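-- pv_equiv track=rewrite | github.com/LeiBaak/clip4clip-slot | modules/slot_adapter.py | _best_hw
-- ===== SOURCE A (Python) =====
-- import math
--
-- def _best_hw(n_tokens: int):
--     """Find H,W s.t. H*W=n_tokens and |H-W| is small (prefer square grids)."""
--     # special-case some common CLIP/PLOT layouts
--     if n_tokens == 49:   # ViT-B/32 224px
--         return 7, 7
--     if n_tokens == 196:  # ViT-L/14 224px
--         return 14, 14
--     if n_tokens == 192:  # PLOT默认图像栅格
--         return 24, 8
--     # generic factorization (closest to square)
--     w = int(round(math.sqrt(n_tokens)))
--     best = (1, n_tokens)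
--     best_gap = n_tokens - 1
--     for h in range(1, w + 1):
--         if n_tokens % h == 0:
--             cand = (h, n_tokens // h)
--             gap = abs(cand[0] - cand[1])
--             if gap < best_gap:
--                 best, best_gap = cand, gap
--     return best
-- ===== SOURCE B (Python) =====
-- import math
--
-- def _best_hw(n_tokens: int):
--     """Find H,W s.t. H*W=n_tokens and |H-W| is small (prefer square grids)."""
--     # special-case some common CLIP/PLOT layouts
--     if n_tokens == 49:
--         return 7, 7
--     if n_tokens == 196:
--         return 14, 14
--     if n_tokens == 192:
--         return 24, 8
--     # first divisor found scanning down from isqrt(n) is the closest-to-square H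
--     for h in range(math.isqrt(n_tokens), 0, -1):
--         if n_tokens % h == 0:
--             return h, n_tokens // h
--     return 1, n_tokens
-- ===== Notes on version B (the rewrite author's own statement) =====
-- stated objective: simpler
-- what changed: Replaced the upward trial loop with a best/min-gap accumulator by a downward scan from isqrt(n) that returns the first divisor found (the largest divisor <= sqrt(n), which is exactly the closest-to-square pair), with (1, n) as fallback.
import Mathlib
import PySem

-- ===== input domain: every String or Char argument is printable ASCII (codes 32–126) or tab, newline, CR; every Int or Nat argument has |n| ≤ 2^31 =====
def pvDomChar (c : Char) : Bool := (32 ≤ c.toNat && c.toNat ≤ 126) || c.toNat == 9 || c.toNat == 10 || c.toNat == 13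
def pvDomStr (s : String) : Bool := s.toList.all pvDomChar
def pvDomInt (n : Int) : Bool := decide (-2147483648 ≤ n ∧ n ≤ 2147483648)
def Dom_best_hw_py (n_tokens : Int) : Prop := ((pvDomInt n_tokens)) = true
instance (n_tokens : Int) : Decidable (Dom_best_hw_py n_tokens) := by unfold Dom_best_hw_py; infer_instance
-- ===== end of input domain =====

-- B replaces A's upward min-gap trial loop by a downward scan from isqrt(n) returning the first
-- divisor found (simpler: no accumulator); proved equal to A on all n_tokens ≥ 0.


-- ===== PORT A =====
def best_hw_py (n_tokens : Int) : Int × Int :=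
  if n_tokens = 49 then (7, 7)
  else if n_tokens = 196 then (14, 14)
  else if n_tokens = 192 then (24, 8)
  else
    -- w = int(round(math.sqrt(n_tokens))): exact nearest integer to sqrt(n) for 0 ≤ n ≤ 2^31
    -- (the double sqrt error is far smaller than the distance of sqrt(n) to any half-integer);
    -- math.sqrt raises ValueError for n < 0 (excluded by Pre_).
    let s : Int := ((Int.toNat n_tokens).sqrt : Int)
    let w : Int := if n_tokens ≤ s * s + s then s else s + 1
    let r :=
      (PySem.List.pyRange 1 (w + 1) 1).foldl
        (fun (st : (Int × Int) × Int) h =>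
          if PySem.Int.mod n_tokens h = 0 then
            let cand : Int × Int := (h, PySem.Int.floordiv n_tokens h)
            let gap : Int := |cand.1 - cand.2|
            if gap < st.2 then (cand, gap) else st
          else st)
        ((1, n_tokens), n_tokens - 1)
    r.1

-- ===== PORT B =====
-- 'for h in range(isqrt(n), 0, -1): if n % h == 0: return …' as downward structural recursion
def bhwDownLoop (n : Int) : Nat → Int × Int
  | 0 => (1, n)
  | (k + 1) =>
      if PySem.Int.mod n ((k : Int) + 1) = 0 then ((k : Int) + 1, PySem.Int.floordiv n ((k : Int) + 1))
      else bhwDownLoop n k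

def best_hw_py_alt (n_tokens : Int) : Int × Int :=
  if n_tokens = 49 then (7, 7)
  else if n_tokens = 196 then (14, 14)
  else if n_tokens = 192 then (24, 8)
  else bhwDownLoop n_tokens (Int.toNat n_tokens).sqrt  -- math.isqrt raises ValueError for n < 0 (excluded by Pre_)

-- ===== PRECONDITION & SPEC =====
-- Both A (math.sqrt) and B (math.isqrt) raise ValueError on negative input.
def Pre_best_hw_py (n_tokens : Int) : Prop := 0 ≤ n_tokens
instance (n_tokens : Int) : Decidable (Pre_best_hw_py n_tokens) := by unfold Pre_best_hw_py; infer_instance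
def pvWitness_best_hw_py : Int := 12

def Spec_best_hw_py (n_tokens : Int) (out : Int × Int) : Prop := out = best_hw_py_alt n_tokens
instance (n_tokens : Int) (out : Int × Int) : Decidable (Spec_best_hw_py n_tokens out) := by unfold Spec_best_hw_py; infer_instance

-- ===== CLAIM (what is proved, stated in full; the proofs are below) =====
def Claim_equal_best_hw_py : Prop := ∀ (n_tokens : Int), Dom_best_hw_py n_tokens → Pre_best_hw_py n_tokens → Spec_best_hw_py n_tokens (best_hw_py n_tokens)

-- ===== LEMMAS AND PROOFS =====

-- A's loop body (let-free, zeta-definitionally equal to the port's lambda), named for the proofs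
def bhwStep (n : Int) (st : (Int × Int) × Int) (h : Int) : (Int × Int) × Int :=
  if PySem.Int.mod n h = 0 then
    (if |h - PySem.Int.floordiv n h| < st.2 then ((h, PySem.Int.floordiv n h), |h - PySem.Int.floordiv n h|) else st)
  else st

lemma bhwDownLoop_succ (n : Int) (k : Nat) :
    bhwDownLoop n (k + 1)
      = if PySem.Int.mod n ((k : Int) + 1) = 0 then ((k : Int) + 1, PySem.Int.floordiv n ((k : Int) + 1))
        else bhwDownLoop n k := rfl

lemma ediv_antitone_of_pos {n d e : Int} (hn : 0 ≤ n) (hd : 0 < d) (hde : d ≤ e) :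
    n / e ≤ n / d := by
  have he : 0 < e := lt_of_lt_of_le hd hde
  rw [Int.le_ediv_iff_mul_le hd]
  calc n / e * d ≤ n / e * e := by
        have : 0 ≤ n / e := Int.ediv_nonneg hn he.le
        exact mul_le_mul_of_nonneg_left hde this
    _ ≤ n := Int.ediv_mul_le n he.ne'

-- Main invariant: for 1 ≤ m with m*m ≤ n, A's fold over range(1, m+1) and B's downward loop at m
-- both compute (d, n/d) for the largest divisor d ≤ m, and A's gap component is n/d - d.
lemma bhw_inv (n : Int) (hn : 1 ≤ n) :
    ∀ m : Nat, 1 ≤ m → ((m : Int)) * ((m : Int)) ≤ n →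
      ∃ d : Int, 1 ≤ d ∧ d ≤ (m : Int) ∧ d ∣ n ∧
        bhwDownLoop n m = (d, n / d) ∧
        (PySem.List.pyRange 1 ((m : Int) + 1) 1).foldl (bhwStep n) ((1, n), n - 1)
          = ((d, n / d), n / d - d) := by
  intro m
  induction m with
  | zero => intro h; omega
  | succ k ih =>
    intro _ hsq
    have hcast : (((k + 1 : Nat)) : Int) = (k : Int) + 1 := by push_cast; ring
    rw [hcast] at hsq ⊢
    by_cases hk : k = 0
    · subst hk
      -- m = 1 : single iteration h = 1
      have hm : PySem.Int.mod n 1 = 0 := by simp [PySem.Int.mod]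
      have hfd : PySem.Int.floordiv n 1 = n := by simp [PySem.Int.floordiv]
      refine ⟨1, le_refl _, by norm_num, one_dvd n, ?_, ?_⟩
      · rw [show ((0 : Nat) + 1) = 1 from rfl, bhwDownLoop_succ]
        simp
      · rw [show ((0 : Nat) : Int) + 1 + 1 = 1 + 1 by norm_num,
            PySem.List.pyRange_one_singleton (a := (1 : Int))]
        simp only [List.foldl, bhwStep]
        rw [if_pos hm]
        have habs : |(1 : Int) - PySem.Int.floordiv n 1| = n - 1 := by
          rw [hfd, abs_sub_comm, abs_of_nonneg (by omega)]
        rw [habs, if_neg (by omega)]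
        simp
    · -- m = k+1 with k ≥ 1
      have hk1 : 1 ≤ k := Nat.one_le_iff_ne_zero.mpr hk
      have hknn : (0 : Int) ≤ (k : Int) := Int.natCast_nonneg k
      have hsqk : ((k : Int)) * ((k : Int)) ≤ n := by nlinarith
      obtain ⟨d, hd1, hdk, hddvd, hB, hA⟩ := ih hk1 hsqk
      have hsplit : PySem.List.pyRange 1 ((k : Int) + 1 + 1) 1
          = PySem.List.pyRange 1 ((k : Int) + 1) 1 ++ [(k : Int) + 1] :=
        PySem.List.pyRange_one_succ_right (by omega)
      have hm1pos : (0 : Int) < (k : Int) + 1 := by omega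
      by_cases hdvd : PySem.Int.mod n ((k : Int) + 1) = 0
      · -- h = k+1 divides n: it replaces the old best (strictly smaller gap)
        have hfd : PySem.Int.floordiv n ((k : Int) + 1) = n / ((k : Int) + 1) :=
          PySem.Int.floordiv_eq_ediv_of_pos hm1pos
        have hle : (k : Int) + 1 ≤ n / ((k : Int) + 1) := by
          rw [Int.le_ediv_iff_mul_le hm1pos]; nlinarith
        have habs : |((k : Int) + 1) - n / ((k : Int) + 1)| = n / ((k : Int) + 1) - ((k : Int) + 1) := by
          rw [abs_sub_comm, abs_of_nonneg (by omega)]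
        have hmono : n / ((k : Int) + 1) ≤ n / d :=
          ediv_antitone_of_pos (by omega) (by omega) (by omega)
        have hgaplt : n / ((k : Int) + 1) - ((k : Int) + 1) < n / d - d := by omega
        refine ⟨(k : Int) + 1, by omega, le_refl _,
          (PySem.Int.mod_eq_zero_iff_dvd n ((k : Int) + 1)).mp hdvd, ?_, ?_⟩
        · rw [bhwDownLoop_succ, if_pos hdvd, hfd]
        · rw [hsplit, List.foldl_append, hA]
          simp only [List.foldl, bhwStep]
          rw [if_pos hdvd, hfd, habs, if_pos hgaplt]
      · -- h = k+1 does not divide n: state unchanged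
        refine ⟨d, hd1, by omega, hddvd, ?_, ?_⟩
        · rw [bhwDownLoop_succ, if_neg hdvd, hB]
        · rw [hsplit, List.foldl_append, hA]
          simp only [List.foldl, bhwStep]
          rw [if_neg hdvd]

lemma sqrt_sq_le {n : Int} (hn : 0 ≤ n) :
    (((Int.toNat n).sqrt : Int)) * (((Int.toNat n).sqrt : Int)) ≤ n := by
  have h := Nat.sqrt_le (Int.toNat n)
  have h2 : (((Int.toNat n).sqrt * (Int.toNat n).sqrt : Nat) : Int) ≤ ((Int.toNat n : Nat) : Int) := by
    exact_mod_cast h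
  rwa [Int.toNat_of_nonneg hn, Nat.cast_mul] at h2

lemma lt_succ_sqrt_sq {n : Int} (hn : 0 ≤ n) :
    n < (((Int.toNat n).sqrt : Int) + 1) * (((Int.toNat n).sqrt : Int) + 1) := by
  have h := Nat.lt_succ_sqrt (Int.toNat n)
  have h2 : ((Int.toNat n : Nat) : Int) < ((((Int.toNat n).sqrt + 1) * ((Int.toNat n).sqrt + 1) : Nat) : Int) := by
    exact_mod_cast h
  rw [Int.toNat_of_nonneg hn] at h2
  push_cast at h2 ⊢
  linarith

-- when A's rounded sqrt is s+1, the extra trial h = s+1 never divides n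
lemma succ_sqrt_not_dvd {n : Int} (hn : 1 ≤ n)
    (hgt : ¬ n ≤ ((Int.toNat n).sqrt : Int) * ((Int.toNat n).sqrt : Int) + ((Int.toNat n).sqrt : Int)) :
    ¬ PySem.Int.mod n (((Int.toNat n).sqrt : Int) + 1) = 0 := by
  set s : Int := ((Int.toNat n).sqrt : Int) with hs
  intro hmod
  have hsnn : (0 : Int) ≤ s := Int.natCast_nonneg _
  have hdvd : (s + 1) ∣ n := (PySem.Int.mod_eq_zero_iff_dvd n (s + 1)).mp hmod
  obtain ⟨c, hc⟩ := hdvd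
  have hub : n < (s + 1) * (s + 1) := lt_succ_sqrt_sq (by omega)
  have hlb : s * (s + 1) < n := by nlinarith
  have hcub : c < s + 1 := by nlinarith
  have hclb : s < c := by nlinarith
  nlinarith

-- ===== VERDICT (by name: the statement is the Claim_ definition above) =====
theorem best_hw_py_spec : Claim_equal_best_hw_py := by
  intro n _ hpre
  unfold Spec_best_hw_py best_hw_py best_hw_py_alt
  by_cases h49 : n = 49
  · simp [h49]
  by_cases h196 : n = 196
  · simp [h196]
  by_cases h192 : n = 192
  · simp [h192]
  simp only [h49, h196, h192, if_false]
  by_cases hz : n = 0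
  · subst hz; decide
  · have hn : 1 ≤ n := by
      have : 0 ≤ n := hpre
      omega
    change ((PySem.List.pyRange 1
        ((if n ≤ (((Int.toNat n).sqrt : Int)) * ((Int.toNat n).sqrt : Int) + ((Int.toNat n).sqrt : Int)
          then (((Int.toNat n).sqrt : Int)) else ((Int.toNat n).sqrt : Int) + 1) + 1) 1).foldl
        (bhwStep n) ((1, n), n - 1)).1 = bhwDownLoop n (Int.toNat n).sqrt
    have hs1 : 1 ≤ (Int.toNat n).sqrt := by
      have : 0 < Int.toNat n := by omega
      exact Nat.sqrt_pos.mpr this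
    obtain ⟨d, hd1, hdk, hddvd, hB, hA⟩ :=
      bhw_inv n hn (Int.toNat n).sqrt hs1 (sqrt_sq_le (by omega))
    by_cases hw : n ≤ (((Int.toNat n).sqrt : Int)) * ((Int.toNat n).sqrt : Int) + ((Int.toNat n).sqrt : Int)
    · rw [if_pos hw, hA, hB]
    · rw [if_neg hw,
        PySem.List.pyRange_one_succ_right (a := (1 : Int)) (by have := Int.natCast_nonneg (Int.toNat n).sqrt; omega),
        List.foldl_append, hA, hB]
      simp only [List.foldl, bhwStep]
      rw [if_neg (succ_sqrt_not_dvd hn hw)]
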